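-- pv_equiv track=rewrite | github.com/matwej29/university | olimpia/1/8.py | fibbonachy_2
-- ===== SOURCE A (Python) =====
-- def fibbonachy_2(n, indexes):
--     fib_prev = 0
--     fib_next = 1
--
--     indexes_set = set(indexes)
--
--     fib_result = [(0, 0), (1, 1)]
--
--     for i in range(2, max(indexes_set)+1):
--         fib_next, fib_prev = (fib_next + fib_prev) % 101, fib_next % 101
--
--         if i in indexes_set:
--             fib_result.append((i, fib_next % 101))
--
--     for i in indexes:
--         for pair in fib_result:
--             if i == pair[0]:
--                 yield pair[1]
-- ===== SOURCE B (Python) =====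
-- def _fib_pair(k):
--     # (F(k) % 101, F(k+1) % 101) by fast doubling
--     if k == 0:
--         return (0, 1)
--     a, b = _fib_pair(k // 2)
--     c = a * (2 * b - a) % 101
--     d = (a * a + b * b) % 101
--     if k % 2 == 0:
--         return (c, d)
--     return (d, (c + d) % 101)
--
--
-- def fibbonachy_2(n, indexes):
--     for i in indexes:
--         if i >= 0:
--             yield _fib_pair(i)[0]
-- ===== Notes on version B (the rewrite author's own statement) =====
-- stated objective: faster
-- what changed: A builds every Fibonacci number mod 101 up to max(indexes) iteratively and then scans its pair table once per query; B computes F(i) mod 101 independently for each index by recursive fast doubling, with no table and no scan.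
import Mathlib
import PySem

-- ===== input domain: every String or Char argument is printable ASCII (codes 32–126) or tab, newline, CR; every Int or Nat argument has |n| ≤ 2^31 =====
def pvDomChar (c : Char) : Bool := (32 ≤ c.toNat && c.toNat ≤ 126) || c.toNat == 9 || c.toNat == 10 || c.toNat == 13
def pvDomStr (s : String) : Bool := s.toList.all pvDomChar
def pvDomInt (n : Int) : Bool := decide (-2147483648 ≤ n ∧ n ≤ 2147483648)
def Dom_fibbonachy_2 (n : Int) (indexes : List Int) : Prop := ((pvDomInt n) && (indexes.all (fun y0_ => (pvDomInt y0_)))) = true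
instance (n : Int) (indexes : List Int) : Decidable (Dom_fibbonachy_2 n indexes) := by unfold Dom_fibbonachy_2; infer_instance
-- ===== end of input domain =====

-- B replaces A's linear table build (all Fibonacci numbers mod 101 up to max(indexes))
-- plus a table scan per query by an independent fast-doubling computation per index (objective: faster in a timing run).
-- A is a generator; both ports return the list of yielded values.

-- ===== PORT A =====
-- One iteration of A's 'for i in range(2, max+1)' loop; state = (fib_prev, fib_next, fib_result).
def fibAStep (s : PySem.Set Int) (st : Int × Int × List (Int × Int)) (i : Int) :
    Int × Int × List (Int × Int) :=
  let fib_next := PySem.Int.mod (st.2.1 + st.1) 101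
  let fib_prev := PySem.Int.mod st.2.1 101
  let res := if i ∈ s then st.2.2 ++ [(i, PySem.Int.mod fib_next 101)] else st.2.2
  (fib_prev, fib_next, res)

def fibbonachy_2 (n : Int) (indexes : List Int) : List Int :=
  let s := PySem.Set.ofList indexes
  match PySem.List.max? s (fun x => x) with
  | none => []   -- unreachable under Pre_ (max() of an empty set raises ValueError)
  | some m =>
    let st := (PySem.List.pyRange 2 (m + 1) 1).foldl (fibAStep s)
      ((0 : Int), (1 : Int), [((0 : Int), (0 : Int)), (1, 1)])
    -- for i in indexes: for pair in fib_result: if i == pair[0]: yield pair[1]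
    indexes.flatMap (fun i => (st.2.2.filter (fun p => p.1 == i)).map (fun p => p.2))

-- ===== PORT B =====
-- Source B's _fib_pair: (F(k) % 101, F(k+1) % 101) by fast doubling.
def fibPairAlt (k : Nat) : Int × Int :=
  if h : k = 0 then ((0 : Int), (1 : Int))
  else
    let p := fibPairAlt (k / 2)
    let a := p.1
    let b := p.2
    let c := PySem.Int.mod (a * (2 * b - a)) 101
    let d := PySem.Int.mod (a * a + b * b) 101
    if k % 2 = 0 then (c, d) else (d, PySem.Int.mod (c + d) 101)
termination_by k
decreasing_by exact Nat.div_lt_self (Nat.pos_of_ne_zero h) (by norm_num)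

def fibbonachy_2_alt (n : Int) (indexes : List Int) : List Int :=
  indexes.flatMap (fun i => if 0 ≤ i then [(fibPairAlt i.toNat).1] else [])

-- ===== PRECONDITION & SPEC =====
-- Pre_ excludes only the empty index list, on which A raises ValueError (max() of an empty set).
def Pre_fibbonachy_2 (n : Int) (indexes : List Int) : Prop := indexes ≠ []
instance (n : Int) (indexes : List Int) : Decidable (Pre_fibbonachy_2 n indexes) := by
  unfold Pre_fibbonachy_2; infer_instance

def pvWitness_fibbonachy_2 : Int × List Int := (0, [0, 5, 3])

def Spec_fibbonachy_2 (n : Int) (indexes : List Int) (out : List Int) : Prop :=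
  out = fibbonachy_2_alt n indexes
instance (n : Int) (indexes : List Int) (out : List Int) : Decidable (Spec_fibbonachy_2 n indexes out) := by
  unfold Spec_fibbonachy_2; infer_instance

-- ===== CLAIM (what is proved, stated in full; the proofs are below) =====
def Claim_equal_fibbonachy_2 : Prop := ∀ (n : Int) (indexes : List Int), Dom_fibbonachy_2 n indexes → Pre_fibbonachy_2 n indexes → Spec_fibbonachy_2 n indexes (fibbonachy_2 n indexes)

-- ===== LEMMAS AND PROOFS =====

-- F(k) mod 101 (the value both programs produce for index k)
def fibm (k : Nat) : Int := (Nat.fib k : Int) % 101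

lemma fibm_modeq (k : Nat) : Int.ModEq 101 (fibm k) (Nat.fib k : Int) := by
  unfold fibm Int.ModEq
  exact Int.emod_emod_of_dvd _ dvd_rfl

lemma pymod101 (x : Int) : PySem.Int.mod x 101 = x % 101 :=
  PySem.Int.mod_eq_emod_of_pos (by norm_num)

lemma fibm_idem (k : Nat) : PySem.Int.mod (fibm k) 101 = fibm k := by
  rw [pymod101]; unfold fibm; exact Int.emod_emod_of_dvd _ dvd_rfl

lemma fib_cast_two_mul (q : Nat) :
    (Nat.fib (2 * q) : Int) = (Nat.fib q : Int) * (2 * (Nat.fib (q + 1) : Int) - (Nat.fib q : Int)) := by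
  have h := Nat.fib_two_mul q
  have hle : Nat.fib q ≤ 2 * Nat.fib (q + 1) := by
    have := Nat.fib_le_fib_succ (n := q); omega
  rw [h]; push_cast [hle]; ring

lemma doubling_c (q : Nat) :
    PySem.Int.mod (fibm q * (2 * fibm (q + 1) - fibm q)) 101 = fibm (2 * q) := by
  rw [pymod101]
  have h : Int.ModEq 101 (fibm q * (2 * fibm (q + 1) - fibm q))
      ((Nat.fib q : Int) * (2 * (Nat.fib (q + 1) : Int) - (Nat.fib q : Int))) :=
    (fibm_modeq q).mul (((fibm_modeq (q + 1)).mul_left 2).sub (fibm_modeq q))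
  calc (fibm q * (2 * fibm (q + 1) - fibm q)) % 101
      = ((Nat.fib q : Int) * (2 * (Nat.fib (q + 1) : Int) - (Nat.fib q : Int))) % 101 := h
    _ = fibm (2 * q) := by rw [← fib_cast_two_mul]; rfl

lemma doubling_d (q : Nat) :
    PySem.Int.mod (fibm q * fibm q + fibm (q + 1) * fibm (q + 1)) 101 = fibm (2 * q + 1) := by
  rw [pymod101]
  have h : Int.ModEq 101 (fibm q * fibm q + fibm (q + 1) * fibm (q + 1))
      ((Nat.fib q : Int) * (Nat.fib q : Int) + (Nat.fib (q + 1) : Int) * (Nat.fib (q + 1) : Int)) :=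
    ((fibm_modeq q).mul (fibm_modeq q)).add ((fibm_modeq (q + 1)).mul (fibm_modeq (q + 1)))
  have hfib : (Nat.fib (2 * q + 1) : Int)
      = (Nat.fib q : Int) * (Nat.fib q : Int) + (Nat.fib (q + 1) : Int) * (Nat.fib (q + 1) : Int) := by
    have := Nat.fib_two_mul_add_one q
    rw [this]; push_cast; ring
  calc (fibm q * fibm q + fibm (q + 1) * fibm (q + 1)) % 101
      = ((Nat.fib q : Int) * (Nat.fib q : Int) + (Nat.fib (q + 1) : Int) * (Nat.fib (q + 1) : Int)) % 101 := h
    _ = fibm (2 * q + 1) := by rw [← hfib]; rfl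

lemma fib_step_sum (k : Nat) :
    PySem.Int.mod (fibm k + fibm (k + 1)) 101 = fibm (k + 2) := by
  rw [pymod101]
  have h : Int.ModEq 101 (fibm k + fibm (k + 1)) ((Nat.fib k : Int) + (Nat.fib (k + 1) : Int)) :=
    (fibm_modeq k).add (fibm_modeq (k + 1))
  calc (fibm k + fibm (k + 1)) % 101 = ((Nat.fib k : Int) + (Nat.fib (k + 1) : Int)) % 101 := h
    _ = fibm (k + 2) := by
        unfold fibm
        rw [Nat.fib_add_two]; push_cast; ring_nf

lemma fibPairAlt_eq (k : Nat) : fibPairAlt k = (fibm k, fibm (k + 1)) := by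
  induction k using Nat.strong_induction_on with
  | _ k ih =>
    unfold fibPairAlt
    by_cases h : k = 0
    · subst h; simp; constructor <;> rfl
    · rw [dif_neg h]
      have ihq := ih (k / 2) (Nat.div_lt_self (Nat.pos_of_ne_zero h) (by norm_num))
      rw [ihq]
      rcases Nat.even_or_odd k with he | ho
      · obtain ⟨q, hq⟩ := he
        have hk2 : k / 2 = q := by omega
        have hm : k % 2 = 0 := by omega
        simp only [hk2, hm]
        rw [doubling_c q, doubling_d q,
            show 2 * q + 1 = k + 1 from by omega, show 2 * q = k from by omega]
        norm_num
      · obtain ⟨q, hq⟩ := ho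
        have hk2 : k / 2 = q := by omega
        have hm : k % 2 = 1 := by omega
        simp only [hk2, hm]
        rw [doubling_c q, doubling_d q, fib_step_sum (2 * q),
            show 2 * q + 2 = k + 1 from by omega, show 2 * q + 1 = k from by omega]
        norm_num

-- ---- A side ----

-- the pairs A's loop appends for keys 2 .. (c+1)
def pairsA (s : List Int) (c : Nat) : List (Int × Int) :=
  (List.range' 2 c).flatMap (fun (k : Nat) => if (k : Int) ∈ s then [((k : Int), fibm k)] else [])

lemma foldA (s : PySem.Set Int) (c : Nat) :
    (PySem.List.pyRange 2 (2 + (c : Int)) 1).foldl (fibAStep s)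
      ((0 : Int), (1 : Int), [((0 : Int), (0 : Int)), (1, 1)]) =
    (fibm c, fibm (c + 1), [((0 : Int), (0 : Int)), (1, 1)] ++ pairsA s c) := by
  induction c with
  | zero =>
    rw [show (2 + ((0 : Nat) : Int)) = 2 by norm_num, PySem.List.pyRange_one_eq_nil (by norm_num)]
    simp [pairsA, fibm]
  | succ c ih =>
    have hc : (2 + ((c + 1 : Nat) : Int)) = (2 + (c : Int)) + 1 := by push_cast; ring
    rw [hc, PySem.List.pyRange_one_succ_right (by omega), List.foldl_append, ih]
    simp only [List.foldl_cons, List.foldl_nil]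
    dsimp only [fibAStep]
    have h1 : PySem.Int.mod (fibm (c + 1) + fibm c) 101 = fibm (c + 2) := by
      rw [show fibm (c + 1) + fibm c = fibm c + fibm (c + 1) from by ring]; exact fib_step_sum c
    rw [h1, fibm_idem (c + 1), fibm_idem (c + 2)]
    have hpairs : pairsA s (c + 1) = pairsA s c ++
        (if ((2 + (c : Int))) ∈ s then [((2 + (c : Int)), fibm (c + 2))] else []) := by
      unfold pairsA
      rw [List.range'_1_concat, List.flatMap_append]
      congr 1
      simp only [List.flatMap_cons, List.flatMap_nil, List.append_nil]
      have e : ((2 + c : Nat) : Int) = 2 + (c : Int) := by push_cast; ring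
      rw [e, show (2 + c : Nat) = c + 2 from by omega]
    rw [hpairs]
    by_cases hmem : ((2 + (c : Int))) ∈ s
    · rw [if_pos hmem, if_pos hmem]
      show (fibm (c + 1), fibm (c + 2), _) = (fibm (c + 1), fibm (c + 1 + 1), _)
      rw [show c + 1 + 1 = c + 2 from rfl]
      simp
    · rw [if_neg hmem, if_neg hmem, List.append_nil]

lemma filter_pairsAux (s : List Int) (i : Int) (a c : Nat) :
    (((List.range' a c).flatMap (fun (k : Nat) => if (k : Int) ∈ s then [((k : Int), fibm k)] else [])).filter
        (fun p => p.1 == i)) =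
    if (a : Int) ≤ i ∧ i < (a : Int) + (c : Int) ∧ i ∈ s then [(i, fibm i.toNat)] else [] := by
  induction c generalizing a with
  | zero =>
    simp only [List.range'_zero, List.flatMap_nil, List.filter_nil]
    have hno : ¬ (((a : Nat) : Int) ≤ i ∧ i < ((a : Nat) : Int) + ((0 : Nat) : Int) ∧ i ∈ s) := by
      rintro ⟨h1, h2, -⟩
      push_cast at h1 h2
      omega
    rw [if_neg hno]
  | succ c ih =>
    rw [List.range'_succ, List.flatMap_cons, List.filter_append, ih (a + 1)]
    by_cases hia : i = (a : Int)
    · subst hia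
      by_cases hs : ((a : Int)) ∈ s
      · rw [if_pos hs]
        rw [if_neg (by push_cast; omega), List.append_nil]
        rw [if_pos (by push_cast; exact ⟨le_refl _, by omega, hs⟩)]
        simp [Int.toNat_natCast]
      · rw [if_neg hs]
        rw [if_neg (by push_cast; omega), if_neg (by push_cast; tauto)]
        rfl
    · have hhead : (((if ((a : Int)) ∈ s then [((a : Int), fibm a)] else []) : List (Int × Int)).filter
          (fun p => p.1 == i)) = [] := by
        by_cases hs : ((a : Int)) ∈ s
        · rw [if_pos hs]
          have e : (((a : Nat) : Int) == i) = false := beq_eq_false_iff_ne.mpr (fun h => hia h.symm)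
          simp [List.filter, e]
        · rw [if_neg hs]; rfl
      rw [hhead, List.nil_append]
      have hiff : ((((a + 1 : Nat)) : Int) ≤ i ∧ i < ((a + 1 : Nat) : Int) + (c : Int) ∧ i ∈ s) ↔
          (((a : Nat) : Int) ≤ i ∧ i < ((a : Nat) : Int) + ((c + 1 : Nat) : Int) ∧ i ∈ s) := by
        constructor <;> rintro ⟨h1, h2, h3⟩ <;> exact ⟨by omega, by omega, h3⟩
      rw [if_congr hiff rfl rfl]

lemma flatMap_congr_mem {α β : Type} (l : List α) (f g : α → List β)
    (h : ∀ x ∈ l, f x = g x) : l.flatMap f = l.flatMap g := by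
  induction l with
  | nil => rfl
  | cons x xs ih =>
    simp only [List.flatMap_cons]
    rw [h x (List.mem_cons_self), ih (fun y hy => h y (List.mem_cons_of_mem _ hy))]

lemma lookup_eq (indexes : List Int) (m : Int) (c : Nat) (i : Int)
    (hi : i ∈ indexes) (him : i ≤ m) (hc : c = (m - 1).toNat) :
    ((([((0 : Int), (0 : Int)), (1, 1)] ++ pairsA (PySem.Set.ofList indexes) c).filter
        (fun p => p.1 == i)).map (fun p => p.2)) =
    if 0 ≤ i then [fibm i.toNat] else [] := by
  rw [List.filter_append]
  unfold pairsA
  rw [filter_pairsAux]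
  have hbase : (([((0 : Int), (0 : Int)), (1, 1)] : List (Int × Int)).filter (fun p => p.1 == i)) =
      if i = 0 then [((0 : Int), (0 : Int))] else if i = 1 then [((1 : Int), (1 : Int))] else [] := by
    by_cases h0 : i = 0
    · subst h0; rfl
    · by_cases h1 : i = 1
      · subst h1; rfl
      · have e0 : (((0 : Int)) == i) = false := beq_eq_false_iff_ne.mpr (fun h => h0 h.symm)
        have e1 : (((1 : Int)) == i) = false := beq_eq_false_iff_ne.mpr (fun h => h1 h.symm)
        simp [List.filter, e0, e1, h0, h1]
  rw [hbase]
  by_cases h0 : i = 0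
  · subst h0
    norm_num [fibm]
  · by_cases h1 : i = 1
    · subst h1
      norm_num [fibm]
    · rw [if_neg h0, if_neg h1, List.nil_append]
      by_cases hpos : 0 ≤ i
      · have hi2 : 2 ≤ i := by omega
        have hin : i ∈ PySem.Set.ofList indexes := by
          rw [PySem.Set.mem_ofList]; exact hi
        have hcond : ((2 : Nat) : Int) ≤ i ∧ i < ((2 : Nat) : Int) + (c : Int) ∧
            i ∈ PySem.Set.ofList indexes := by
          refine ⟨by push_cast; omega, ?_, hin⟩
          have : (c : Int) = m - 1 := by omega
          push_cast; omega
        rw [if_pos hcond, if_pos hpos]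
        rfl
      · rw [if_neg (by rintro ⟨hh, -, -⟩; push_cast at hh; omega), if_neg hpos]
        rfl

lemma pyRange_shift (m : Int) :
    PySem.List.pyRange 2 (m + 1) 1 = PySem.List.pyRange 2 (2 + (((m - 1).toNat : Nat) : Int)) 1 := by
  by_cases h : m ≤ 1
  · rw [PySem.List.pyRange_one_eq_nil (by omega), PySem.List.pyRange_one_eq_nil (by omega)]
  · congr 1; omega

-- ===== VERDICT (by name: the statement is the Claim_ definition above) =====
theorem fibbonachy_2_spec : Claim_equal_fibbonachy_2 := by
  intro n indexes _ hpre
  unfold Spec_fibbonachy_2 fibbonachy_2 fibbonachy_2_alt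
  simp only []
  cases hmax : PySem.List.max? (PySem.Set.ofList indexes) (fun x => x) with
  | none =>
    exfalso
    rw [PySem.List.max?_eq_none_iff] at hmax
    cases indexes with
    | nil => exact hpre rfl
    | cons x xs =>
      have : x ∈ PySem.Set.ofList (x :: xs) := by
        rw [PySem.Set.mem_ofList]; exact List.mem_cons_self
      rw [hmax] at this
      exact List.not_mem_nil this
  | some m =>
    dsimp only []
    rw [pyRange_shift m, foldA (PySem.Set.ofList indexes) ((m - 1).toNat)]
    apply flatMap_congr_mem
    intro i hi
    have him : i ≤ m := by
      have := PySem.List.max?_isMax hmax i (by rw [PySem.Set.mem_ofList]; exact hi)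
      simpa using this
    rw [lookup_eq indexes m ((m - 1).toNat) i hi him rfl]
    by_cases hpos : 0 ≤ i
    · rw [if_pos hpos, if_pos hpos, fibPairAlt_eq]
    · rw [if_neg hpos, if_neg hpos]
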